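-- pv_equiv track=rewrite | github.com/zuzka98/timeflow | backup/import_db.py | order_parquet_batches_by_table_order
-- ===== SOURCE A (Python) =====
-- TABLE_ORDER = {
--     "appuser": 0,
--     "client": 1,
--     "team": 2,
--     "sponsor": 3,
--     "epic": 4,
--     "epicarea": 5,
--     "role": 6,
--     "rate": 7,
--     "timelog": 8,
--     "forecast": 9,
--     "capacity": 10,
--     "demand": 11,
-- }
--
-- def order_parquet_batches_by_table_order(parquet_batches):
--     """
--     Order the parquet batches by the specific table order.
--     Returns dictionary of parquet batches that are ordered.
--
--     Parameters
--     ----------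
--     parquet_batches : dict
--         Dictionary of parquet files to be ordered.
--     """
--     index = 0
--     while parquet_batches.get(index) is not None:
--         parquet_batch = parquet_batches[index]
--         ordered_parquet_batch = sorted(parquet_batch, key=lambda x: TABLE_ORDER[x])
--         parquet_batches[index] = ordered_parquet_batch
--         index += 1
--     return parquet_batches
-- ===== SOURCE B (Python) =====
-- TABLE_ORDER = {
--     "appuser": 0,
--     "client": 1,
--     "team": 2,
--     "sponsor": 3,
--     "epic": 4,
--     "epicarea": 5,
--     "role": 6,
--     "rate": 7,
--     "timelog": 8,
--     "forecast": 9,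
--     "capacity": 10,
--     "demand": 11,
-- }
--
-- def order_parquet_batches_by_table_order(parquet_batches):
--     # counting sort over the fixed table ranks instead of a comparison sort
--     limit = 0
--     while limit in parquet_batches:
--         limit += 1
--     for index, batch in parquet_batches.items():
--         if 0 <= index < limit:
--             parquet_batches[index] = [name for name in TABLE_ORDER
--                                       for _ in range(batch.count(name))]
--     return parquet_batches
-- ===== Notes on version B (the rewrite author's own statement) =====
-- stated objective: alternative
-- what changed: Replaces the per-batch comparison sort keyed by TABLE_ORDER lookups with a counting sort: the first missing index (limit) is computed once, then each reachable batch is rebuilt by emitting each of the 12 table names repeated by its count, in fixed table order.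
import Mathlib
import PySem

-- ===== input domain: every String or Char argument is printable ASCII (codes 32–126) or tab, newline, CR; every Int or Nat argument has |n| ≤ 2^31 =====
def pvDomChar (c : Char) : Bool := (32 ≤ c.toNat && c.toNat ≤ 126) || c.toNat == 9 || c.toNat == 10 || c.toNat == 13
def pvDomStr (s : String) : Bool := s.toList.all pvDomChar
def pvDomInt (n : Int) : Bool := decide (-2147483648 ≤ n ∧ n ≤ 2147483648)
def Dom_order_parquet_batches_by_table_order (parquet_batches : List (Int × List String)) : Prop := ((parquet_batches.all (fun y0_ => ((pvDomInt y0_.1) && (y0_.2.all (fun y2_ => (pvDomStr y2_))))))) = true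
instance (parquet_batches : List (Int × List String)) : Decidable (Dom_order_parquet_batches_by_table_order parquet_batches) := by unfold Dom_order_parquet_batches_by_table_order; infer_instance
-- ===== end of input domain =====

-- B replaces A's per-batch comparison sort (sorted with a TABLE_ORDER-rank key) by a counting
-- sort over the 12 fixed table names; equivalence of the RETURN value is proved (both Pythons
-- also mutate the argument dict in place in the same way).


-- ===== PORT A =====
-- TABLE_ORDER as a Python dict
def pvTableOrder : PySem.Dict String Int := PySem.Dict.mk
  [("appuser", 0), ("client", 1), ("team", 2), ("sponsor", 3), ("epic", 4), ("epicarea", 5),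
   ("role", 6), ("rate", 7), ("timelog", 8), ("forecast", 9), ("capacity", 10), ("demand", 11)]

-- TABLE_ORDER[x]; a missing key raises KeyError in Python (excluded by Pre_), default 12 is never used there
def pvRank (s : String) : Int := pvTableOrder.getD s 12

-- sorted(parquet_batch, key=lambda x: TABLE_ORDER[x])
def pvSortBatch (b : List String) : List String := PySem.List.sorted b pvRank false

-- while parquet_batches.get(index) is not None: … ; fuel = len+1 only makes the loop structurally
-- terminating (the loop runs at most len(dict) times, so the fuel is never exhausted)
def pvLoopA : Nat → PySem.Dict Int (List String) → Int → PySem.Dict Int (List String)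
  | 0, d, _ => d
  | f + 1, d, i =>
    match d.get? i with
    | none => d
    | some b => pvLoopA f (d.insert i (pvSortBatch b)) (i + 1)

def order_parquet_batches_by_table_order (parquet_batches : List (Int × List String)) : List (Int × List String) :=
  (pvLoopA (parquet_batches.length + 1) (PySem.Dict.mk parquet_batches) 0).items

-- ===== PORT B =====
-- the keys of TABLE_ORDER, in insertion (= rank) order
def pvTableNames : List String :=
  ["appuser", "client", "team", "sponsor", "epic", "epicarea",
   "role", "rate", "timelog", "forecast", "capacity", "demand"]

-- limit = 0; while limit in parquet_batches: limit += 1   (same fuel note as for pvLoopA)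
def pvLimit : Nat → PySem.Dict Int (List String) → Int → Int
  | 0, _, i => i
  | f + 1, d, i => if d.contains i then pvLimit f d (i + 1) else i

-- [name for name in TABLE_ORDER for _ in range(batch.count(name))]
def pvCountSort (b : List String) : List String :=
  pvTableNames.flatMap (fun t => List.replicate (PySem.List.count b t) t)

def order_parquet_batches_by_table_order_alt (parquet_batches : List (Int × List String)) : List (Int × List String) :=
  let d := PySem.Dict.mk parquet_batches
  let limit := pvLimit (parquet_batches.length + 1) d 0
  d.items.map (fun p => if 0 ≤ p.1 ∧ p.1 < limit then (p.1, pvCountSort p.2) else p)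

-- ===== PRECONDITION & SPEC =====
-- Pre_ excludes (a) assoc lists with duplicate keys, which do not denote a Python dict (a dict's
-- keys are unique; on such lists the two ports' accidental values may differ), and (b) inputs on
-- which A raises KeyError: a batch that the while-loop reaches (its key k has 0,1,…,k all
-- present as keys) containing a name outside TABLE_ORDER.
def Pre_order_parquet_batches_by_table_order (parquet_batches : List (Int × List String)) : Prop :=
  (parquet_batches.map Prod.fst).Nodup ∧
  ∀ p ∈ parquet_batches,
    (0 ≤ p.1 ∧ ∀ j < p.1.toNat + 1, ∃ q ∈ parquet_batches, q.1 = (j : Int)) →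
    ∀ s ∈ p.2, s ∈ pvTableNames
instance (parquet_batches : List (Int × List String)) : Decidable (Pre_order_parquet_batches_by_table_order parquet_batches) := by unfold Pre_order_parquet_batches_by_table_order; infer_instance

def pvWitness_order_parquet_batches_by_table_order : (List (Int × List String)) :=
  [(0, ["client", "appuser", "client"]), (5, ["whatever"]), (1, ["team"])]

def Spec_order_parquet_batches_by_table_order (parquet_batches : List (Int × List String)) (out : List (Int × List String)) : Prop := out = order_parquet_batches_by_table_order_alt parquet_batches
instance (parquet_batches : List (Int × List String)) (out : List (Int × List String)) : Decidable (Spec_order_parquet_batches_by_table_order parquet_batches out) := by unfold Spec_order_parquet_batches_by_table_order; infer_instance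

-- ===== CLAIM (what is proved, stated in full; the proofs are below) =====
def Claim_equal_order_parquet_batches_by_table_order : Prop := ∀ (parquet_batches : List (Int × List String)), Dom_order_parquet_batches_by_table_order parquet_batches → Pre_order_parquet_batches_by_table_order parquet_batches → Spec_order_parquet_batches_by_table_order parquet_batches (order_parquet_batches_by_table_order parquet_batches)

-- ===== LEMMAS AND PROOFS =====

-- the lexicographic order (rank, name): antisymmetric, so it pins the sorted list down
def pvLe (a b : String) : Prop := pvRank a < pvRank b ∨ (pvRank a = pvRank b ∧ a ≤ b)

theorem pvRank_inj : ∀ a ∈ pvTableNames, ∀ b ∈ pvTableNames, pvRank a = pvRank b → a = b := by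
  decide

theorem pvNames_rank_pairwise : pvTableNames.Pairwise (fun t u => pvRank t < pvRank u) := by
  decide

theorem pvNames_nodup : pvTableNames.Nodup := by decide

theorem pv_count_flatMap_replicate (ts : List String) (f : String → Nat) (a : String)
    (h : ts.Nodup) :
    (ts.flatMap (fun t => List.replicate (f t) t)).count a = if a ∈ ts then f a else 0 := by
  induction ts with
  | nil => simp
  | cons t ts ih =>
    simp only [List.flatMap_cons, List.count_append, List.count_replicate,
      List.nodup_cons] at *
    obtain ⟨hnt, hnd⟩ := h
    rw [ih hnd]
    by_cases hat : a = t
    · subst hat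
      simp [hnt]
    · simp [hat, Ne.symm hat, List.mem_cons]

theorem pv_pairwise_countSort (ts : List String)
    (h : ts.Pairwise (fun t u => pvRank t < pvRank u)) (f : String → Nat) :
    (ts.flatMap (fun t => List.replicate (f t) t)).Pairwise pvLe := by
  induction ts with
  | nil => simp
  | cons t ts ih =>
    simp only [List.flatMap_cons, List.pairwise_append, List.pairwise_cons] at *
    obtain ⟨h1, h2⟩ := h
    refine ⟨?_, ih h2, ?_⟩
    · rw [List.pairwise_replicate]
      right; right; exact ⟨rfl, le_refl t⟩
    · intro x hx y hy
      rw [List.eq_of_mem_replicate hx]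
      obtain ⟨u, hu, hyu⟩ := List.mem_flatMap.mp hy
      rw [List.eq_of_mem_replicate hyu]
      exact Or.inl (h1 u hu)

theorem pv_sorted_eq_countSort (b : List String) (h : ∀ s ∈ b, s ∈ pvTableNames) :
    pvSortBatch b = pvCountSort b := by
  have hperm : (pvCountSort b).Perm b := by
    rw [List.perm_iff_count]
    intro a
    rw [pvCountSort, pv_count_flatMap_replicate _ _ _ pvNames_nodup]
    by_cases ha : a ∈ pvTableNames
    · simp [ha, PySem.List.count_eq]
    · simp only [ha, if_false]
      exact (List.count_eq_zero.mpr (fun hab => ha (h a hab))).symm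
  have hps : (pvSortBatch b).Pairwise pvLe := by
    have h1 : (pvSortBatch b).Pairwise (fun a c => pvRank a ≤ pvRank c) :=
      PySem.List.sorted_pairwise b pvRank
    refine h1.imp_of_mem ?_
    intro a c hma hmc hle
    have ha' : a ∈ pvTableNames := h a ((PySem.List.mem_sorted _ _ _ _).mp hma)
    have hc' : c ∈ pvTableNames := h c ((PySem.List.mem_sorted _ _ _ _).mp hmc)
    rcases lt_or_eq_of_le hle with hlt | heq
    · exact Or.inl hlt
    · have : a = c := pvRank_inj a ha' c hc' heq
      exact Or.inr ⟨heq, le_of_eq this⟩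
  have hpc : (pvCountSort b).Pairwise pvLe :=
    pv_pairwise_countSort pvTableNames pvNames_rank_pairwise _
  have hanti : ∀ (a c : String), a ∈ pvSortBatch b → c ∈ pvCountSort b → pvLe a c → pvLe c a → a = c := by
    intro a c _ _ h1 h2
    rcases h1 with h1 | ⟨he1, hle1⟩
    · rcases h2 with h2 | ⟨he2, _⟩
      · omega
      · omega
    · rcases h2 with h2 | ⟨_, hle2⟩
      · omega
      · exact le_antisymm hle1 hle2
  exact List.Perm.eq_of_pairwise hanti hps hpc
    ((PySem.List.sorted_perm b pvRank false).trans hperm.symm)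

theorem pv_le_pvLimit : ∀ (f : Nat) (d : PySem.Dict Int (List String)) (i : Int),
    i ≤ pvLimit f d i := by
  intro f
  induction f with
  | zero => intro d i; simp [pvLimit]
  | succ f ih =>
    intro d i
    simp only [pvLimit]
    split
    · exact le_trans (by omega) (ih d (i + 1))
    · exact le_refl i

theorem pv_pvLimit_contains : ∀ (f : Nat) (d : PySem.Dict Int (List String)) (i j : Int),
    i ≤ j → j < pvLimit f d i → d.contains j = true := by
  intro f
  induction f with
  | zero => intro d i j h1 h2; simp [pvLimit] at h2; omega
  | succ f ih =>
    intro d i j h1 h2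
    simp only [pvLimit] at h2
    split at h2
    · rcases eq_or_lt_of_le h1 with rfl | hlt
      · assumption
      · exact ih d (i + 1) j (by omega) h2
    · omega

theorem pv_pvLimit_congr : ∀ (f : Nat) (d d' : PySem.Dict Int (List String)) (i : Int),
    (∀ j, i ≤ j → d'.contains j = d.contains j) → pvLimit f d' i = pvLimit f d i := by
  intro f
  induction f with
  | zero => intro d d' i h; rfl
  | succ f ih =>
    intro d d' i h
    simp only [pvLimit, h i le_rfl]
    split
    · exact ih d d' (i + 1) (fun j hj => h j (by omega))
    · rfl

theorem pv_loopA_items : ∀ (f : Nat) (d : PySem.Dict Int (List String)) (i : Int),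
    d.keys.Nodup →
    (pvLoopA f d i).items =
      d.items.map (fun p => if i ≤ p.1 ∧ p.1 < pvLimit f d i then (p.1, pvSortBatch p.2) else p) := by
  intro f
  induction f with
  | zero =>
    intro d i hnd
    simp only [pvLoopA, pvLimit]
    have : ∀ p ∈ d.items, (if i ≤ p.1 ∧ p.1 < i then (p.1, pvSortBatch p.2) else p) = p := by
      intro p _; rw [if_neg (by omega)]
    exact ((List.map_congr_left this).trans (List.map_id' _)).symm
  | succ f ih =>
    intro d i hnd
    simp only [pvLoopA, pvLimit]
    cases hg : d.get? i with
    | none =>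
      have hc : d.contains i = false := by
        rw [PySem.Dict.contains_eq_isSome_get?, hg]; rfl
      simp only [hc, Bool.false_eq_true, if_false]
      have : ∀ p ∈ d.items, (if i ≤ p.1 ∧ p.1 < i then (p.1, pvSortBatch p.2) else p) = p := by
        intro p _; rw [if_neg (by omega)]
      exact ((List.map_congr_left this).trans (List.map_id' _)).symm
    | some b =>
      have hc : d.contains i = true := by
        rw [PySem.Dict.contains_eq_isSome_get?, hg]; rfl
      simp only [hc, if_true]
      set d' := d.insert i (pvSortBatch b) with hd'
      have hnd' : d'.keys.Nodup := by
        rw [hd', PySem.Dict.keys_insert_of_contains d _ hc]; exact hnd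
      have hcongr : ∀ j : Int, i + 1 ≤ j → d'.contains j = d.contains j := by
        intro j hj
        rw [hd', PySem.Dict.contains_insert]
        have : (j == i) = false := by simp; omega
        rw [this, Bool.false_or]
      have hlim : pvLimit f d' (i + 1) = pvLimit f d (i + 1) :=
        pv_pvLimit_congr f d d' (i + 1) hcongr
      rw [ih d' (i + 1) hnd', hlim]
      rw [hd', PySem.Dict.items_insert_of_contains d _ hc, List.map_map]
      apply List.map_congr_left
      rintro ⟨k, v⟩ hp
      simp only [Function.comp_apply]
      by_cases hpi : k = i
      · subst hpi
        have hbv : b = v := by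
          have h2 := PySem.Dict.get?_of_mem_items d hp hnd
          rw [hg] at h2
          exact Option.some_inj.mp h2
        subst hbv
        have hlt : k < pvLimit f d (k + 1) :=
          lt_of_lt_of_le (by omega) (pv_le_pvLimit f d (k + 1))
        simp only [beq_self_eq_true, if_true]
        split_ifs with h1 h2 <;> first | rfl | (simp_all)
      · have hne : (k == i) = false := by simp [hpi]
        simp only [hne, Bool.false_eq_true, if_false]
        split_ifs with h1 h2 h2 <;> first | rfl | (simp_all; omega)

-- ===== VERDICT (by name: the statement is the Claim_ definition above) =====
theorem order_parquet_batches_by_table_order_spec : Claim_equal_order_parquet_batches_by_table_order := by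
  intro pb _hdom hpre
  obtain ⟨hnd, hval⟩ := hpre
  have hnd' : (PySem.Dict.mk pb).keys.Nodup := hnd
  unfold Spec_order_parquet_batches_by_table_order
  unfold order_parquet_batches_by_table_order order_parquet_batches_by_table_order_alt
  rw [pv_loopA_items (pb.length + 1) (PySem.Dict.mk pb) 0 hnd']
  apply List.map_congr_left
  rintro ⟨k, v⟩ hp
  by_cases hcond : 0 ≤ k ∧ k < pvLimit (pb.length + 1) (PySem.Dict.mk pb) 0
  · rw [if_pos hcond, if_pos hcond]
    have hreach : 0 ≤ k ∧ ∀ j < k.toNat + 1, ∃ q ∈ pb, q.1 = (j : Int) := by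
      refine ⟨hcond.1, fun j hj => ?_⟩
      have hcont : (PySem.Dict.mk pb).contains (j : Int) = true :=
        pv_pvLimit_contains (pb.length + 1) (PySem.Dict.mk pb) 0 (j : Int)
          (by omega) (by omega)
      rw [PySem.Dict.contains_eq_decide_mem_keys] at hcont
      have hmem : (j : Int) ∈ (PySem.Dict.mk pb).keys := of_decide_eq_true hcont
      obtain ⟨q, hq, hq1⟩ := List.mem_map.mp hmem
      exact ⟨q, hq, hq1⟩
    have := hval (k, v) hp hreach
    rw [pv_sorted_eq_countSort v this]
  · rw [if_neg hcond, if_neg hcond]
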